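-- pv_equiv track=rewrite | github.com/jhester599/pgr-vesting-decision-support | src/reporting/email_sender.py | _extract_markdown_tables
-- ===== SOURCE A (Python) =====
-- def _extract_markdown_tables(text: str) -> list[list[str]]:
--     tables: list[list[str]] = []
--     current: list[str] = []
--     for line in text.splitlines():
--         if line.strip().startswith("|"):
--             current.append(line.rstrip())
--             continue
--         if current:
--             tables.append(current)
--             current = []
--     if current:
--         tables.append(current)
--     return tables
-- ===== SOURCE B (Python) =====
-- def _extract_markdown_tables(text: str) -> list[list[str]]:
--     def is_table(line: str) -> bool:
--         return line.strip().startswith("|")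
--
--     lines = text.splitlines()
--     tables: list[list[str]] = []
--     i, n = 0, len(lines)
--     while i < n:
--         if is_table(lines[i]):
--             j = i + 1
--             while j < n and is_table(lines[j]):
--                 j += 1
--             tables.append([l.rstrip() for l in lines[i:j]])
--             i = j
--         else:
--             i += 1
--     return tables
-- ===== Notes on version B (the rewrite author's own statement) =====
-- stated objective: alternative
-- what changed: Replaces the accumulator-and-flush state machine over lines with a run scanner: for each run of table lines it finds the run's end index in an inner scan and emits that whole slice at once, so there is no pending buffer and no post-loop flush.
import Mathlib
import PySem

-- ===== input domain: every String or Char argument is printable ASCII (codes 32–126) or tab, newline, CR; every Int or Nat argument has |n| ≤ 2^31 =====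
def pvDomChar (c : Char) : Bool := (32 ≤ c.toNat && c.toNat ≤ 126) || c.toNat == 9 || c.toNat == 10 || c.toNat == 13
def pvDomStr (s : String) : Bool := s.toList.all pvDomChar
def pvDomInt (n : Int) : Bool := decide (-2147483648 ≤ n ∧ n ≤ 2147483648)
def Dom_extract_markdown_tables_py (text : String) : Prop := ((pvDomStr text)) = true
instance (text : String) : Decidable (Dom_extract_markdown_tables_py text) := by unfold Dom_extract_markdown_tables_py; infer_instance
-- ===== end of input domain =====

-- B is an alternative decomposition: a run scanner emitting each maximal run of table lines at once,
-- instead of A's accumulator-and-flush state machine.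

-- line.strip().startswith("|")
def pvIsTableLine (line : String) : Bool := PySem.Str.startswith (PySem.Str.strip line) "|"

-- ===== PORT A =====
def extract_markdown_tables_py (text : String) : List (List String) :=
  let st := (PySem.Str.splitlines text).foldl
    (fun (st : List (List String) × List String) line =>
      if pvIsTableLine line then
        (st.1, st.2 ++ [PySem.Str.rstrip line])
      else if st.2 ≠ [] then
        (st.1 ++ [st.2], [])
      else st)
    ([], [])
  if st.2 ≠ [] then st.1 ++ [st.2] else st.1

-- ===== PORT B =====
-- B's index/while run scanner, transcribed as recursion on the line list: the true branch
-- emits the whole maximal run (B's inner 'while j' scan = takeWhile, 'i = j' = dropWhile).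
def pvAltGo : List String → List (List String)
  | [] => []
  | l :: ls =>
    if pvIsTableLine l then
      ((l :: ls).takeWhile pvIsTableLine).map PySem.Str.rstrip
        :: pvAltGo ((l :: ls).dropWhile pvIsTableLine)
    else pvAltGo ls
termination_by ls => ls.length
decreasing_by
  · simp only [List.dropWhile_cons, *, if_pos]
    have := List.length_dropWhile_le (p := pvIsTableLine) (l := ls)
    simpa using Nat.lt_succ_of_le this
  · simp

def extract_markdown_tables_py_alt (text : String) : List (List String) :=
  pvAltGo (PySem.Str.splitlines text)

-- ===== PRECONDITION & SPEC =====
def Spec_extract_markdown_tables_py (text : String) (out : List (List String)) : Prop := out = extract_markdown_tables_py_alt text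
instance (text : String) (out : List (List String)) : Decidable (Spec_extract_markdown_tables_py text out) := by unfold Spec_extract_markdown_tables_py; infer_instance

-- ===== CLAIM (what is proved, stated in full; the proofs are below) =====
def Claim_equal_extract_markdown_tables_py : Prop := ∀ (text : String), Dom_extract_markdown_tables_py text → Spec_extract_markdown_tables_py text (extract_markdown_tables_py text)

-- ===== LEMMAS AND PROOFS =====

-- proof helpers: A's fold step and post-loop flush, named
def pvStep (st : List (List String) × List String) (line : String) :
    List (List String) × List String :=
  if pvIsTableLine line then (st.1, st.2 ++ [PySem.Str.rstrip line])
  else if st.2 ≠ [] then (st.1 ++ [st.2], []) else st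

def pvFlush (st : List (List String) × List String) : List (List String) :=
  if st.2 ≠ [] then st.1 ++ [st.2] else st.1

lemma pvA_eq (text : String) :
    extract_markdown_tables_py text =
      pvFlush ((PySem.Str.splitlines text).foldl pvStep ([], [])) := rfl

-- A's fold-then-flush with an explicit pending buffer
def pvGo2 (cur : List String) : List String → List (List String)
  | [] => if cur ≠ [] then [cur] else []
  | l :: ls =>
    if pvIsTableLine l then pvGo2 (cur ++ [PySem.Str.rstrip l]) ls
    else if cur ≠ [] then cur :: pvGo2 [] ls else pvGo2 [] ls

lemma pvFold_eq_go2 (lines : List String) (tables : List (List String)) (cur : List String) :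
    pvFlush (lines.foldl pvStep (tables, cur)) = tables ++ pvGo2 cur lines := by
  induction lines generalizing tables cur with
  | nil =>
    simp only [List.foldl_nil, pvFlush, pvGo2]
    split_ifs <;> simp
  | cons l ls ih =>
    simp only [List.foldl_cons, pvStep, pvGo2]
    by_cases h : pvIsTableLine l = true
    · simp only [h, if_pos]
      exact ih tables (cur ++ [PySem.Str.rstrip l])
    · simp only [h, Bool.false_eq_true, if_false]
      by_cases hc : cur = []
      · simp only [hc, ne_eq, not_true_eq_false, if_false]
        exact ih tables []
      · simp only [ne_eq, hc, not_false_eq_true, if_true]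
        rw [ih (tables ++ [cur]) []]
        simp

lemma pvGo2_eq_altGo (lines : List String) (cur : List String) :
    pvGo2 cur lines =
      if cur = [] then pvAltGo lines
      else (cur ++ (lines.takeWhile pvIsTableLine).map PySem.Str.rstrip)
             :: pvAltGo (lines.dropWhile pvIsTableLine) := by
  induction lines generalizing cur with
  | nil =>
    simp only [pvGo2, pvAltGo, List.takeWhile_nil, List.dropWhile_nil, List.map_nil,
      List.append_nil]
    split_ifs <;> simp_all
  | cons l ls ih =>
    by_cases h : pvIsTableLine l = true
    · rw [pvGo2, if_pos h, ih]
      have hne : cur ++ [PySem.Str.rstrip l] ≠ [] := by simp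
      rw [if_neg hne]
      by_cases hc : cur = []
      · rw [if_pos hc, pvAltGo, if_pos h]
        simp [hc, List.takeWhile_cons, List.dropWhile_cons, h]
      · rw [if_neg hc]
        simp [List.takeWhile_cons, List.dropWhile_cons, h]
    · have ha : pvAltGo (l :: ls) = pvAltGo ls := by rw [pvAltGo, if_neg (by simp [h])]
      rw [pvGo2, if_neg (by simp [h])]
      by_cases hc : cur = []
      · simp [hc, ih, ha]
      · simp only [ne_eq, hc, not_false_eq_true, if_true, if_neg hc]
        rw [ih, if_pos rfl]
        simp [List.takeWhile_cons, List.dropWhile_cons, h, ha]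

-- ===== VERDICT (by name: the statement is the Claim_ definition above) =====
theorem extract_markdown_tables_py_spec : Claim_equal_extract_markdown_tables_py := by
  intro text _
  show extract_markdown_tables_py text = extract_markdown_tables_py_alt text
  rw [pvA_eq, pvFold_eq_go2, pvGo2_eq_altGo]
  simp [extract_markdown_tables_py_alt]
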